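-- pv_equiv track=rewrite | github.com/RideGreg/LeetCode | Python/uber.py | concatSwaps
-- ===== SOURCE A (Python) =====
-- def concatSwaps(s, sizes): # 8
--     ll = len(sizes)
--     ans, start = [''] * ll, 0
--     for i, sz in enumerate(sizes):
--         # find swapped index
--         i = i+1 if i % 2 == 0 else i-1
--         if i >= ll: # revert last single index
--             i -= 1
--         ans[i] = s[start : start + sz]
--         start += sz
--     return ''.join(ans)
-- ===== SOURCE B (Python) =====
-- def concatSwaps(s, sizes):
--     # Single pairwise pass: consume sizes two at a time, emitting each pair of
--     # slices already swapped; a final odd chunk is emitted as-is.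
--     out = []
--     start = 0
--     i = 0
--     n = len(sizes)
--     while n - i >= 2:
--         a, b = sizes[i], sizes[i + 1]
--         out.append(s[start + a:start + a + b])
--         out.append(s[start:start + a])
--         start += a + b
--         i += 2
--     if i < n:
--         out.append(s[start:start + sizes[i]])
--     return ''.join(out)
-- ===== Notes on version B (the rewrite author's own statement) =====
-- stated objective: simpler
-- what changed: Replaces A's scatter-writes into a preallocated array at a parity-computed swapped index by a single pairwise pass that consumes sizes two at a time and emits each pair of slices already swapped (final odd chunk as-is).
import Mathlib
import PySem

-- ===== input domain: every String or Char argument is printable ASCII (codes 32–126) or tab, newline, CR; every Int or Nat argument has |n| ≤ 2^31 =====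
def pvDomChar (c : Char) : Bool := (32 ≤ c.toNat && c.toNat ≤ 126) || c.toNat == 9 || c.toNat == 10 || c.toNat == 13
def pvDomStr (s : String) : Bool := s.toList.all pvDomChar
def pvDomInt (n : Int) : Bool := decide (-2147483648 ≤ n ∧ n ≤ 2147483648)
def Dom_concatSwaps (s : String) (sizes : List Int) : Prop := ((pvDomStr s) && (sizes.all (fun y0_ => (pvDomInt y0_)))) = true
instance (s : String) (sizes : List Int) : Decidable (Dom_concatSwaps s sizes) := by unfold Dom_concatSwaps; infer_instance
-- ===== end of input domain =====

-- B replaces A's scatter-write into a preallocated array at a parity-computed swapped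
-- index by a recursion that consumes sizes two at a time and emits each pair of slices
-- already swapped (objective: simpler).

-- ===== PORT A =====
-- A's index computation: i = i+1 if i % 2 == 0 else i-1; if i >= ll: i -= 1
def swapIdx (ll i : Int) : Int :=
  let i1 := if PySem.Int.mod i 2 == 0 then i + 1 else i - 1
  if i1 ≥ ll then i1 - 1 else i1

-- A's loop body ('ans[i] = s[start:start+sz]; start += sz'); Python's ans[i]= would
-- raise out of range, but i is in range on every iteration (see concatSwaps_loop_eq
-- below), so the total pySetD is exact here.
def concatSwapsStep (s : String) (ll : Int) (st : List String × Int) (p : Int × Int) : List String × Int :=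
  (PySem.List.pySetD st.1 (swapIdx ll p.1) (PySem.Str.slice s (some st.2) (some (st.2 + p.2))), st.2 + p.2)

def concatSwaps (s : String) (sizes : List Int) : String :=
  let ll : Int := sizes.length
  let res := (PySem.List.enumerate sizes 0).foldl (concatSwapsStep s ll) (List.replicate sizes.length "", 0)
  PySem.Str.join "" res.1

-- ===== PORT B =====
def concatSwapsGo (s : String) (start : Int) : List Int → List String
  | [] => []
  | [a] => [PySem.Str.slice s (some start) (some (start + a))]
  | a :: b :: rest =>
      [PySem.Str.slice s (some (start + a)) (some (start + a + b)),
       PySem.Str.slice s (some start) (some (start + a))] ++ concatSwapsGo s (start + a + b) rest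

def concatSwaps_alt (s : String) (sizes : List Int) : String :=
  PySem.Str.join "" (concatSwapsGo s 0 sizes)

-- ===== PRECONDITION & SPEC =====
def Spec_concatSwaps (s : String) (sizes : List Int) (out : String) : Prop := out = concatSwaps_alt s sizes
instance (s : String) (sizes : List Int) (out : String) : Decidable (Spec_concatSwaps s sizes out) := by unfold Spec_concatSwaps; infer_instance

-- ===== CLAIM (what is proved, stated in full; the proofs are below) =====
def Claim_equal_concatSwaps : Prop := ∀ (s : String) (sizes : List Int), Dom_concatSwaps s sizes → Spec_concatSwaps s sizes (concatSwaps s sizes)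

-- ===== LEMMAS AND PROOFS =====

theorem swapIdx_last (m : Nat) (hm : m % 2 = 0) : swapIdx ((m + 1 : Nat) : Int) (m : Int) = ((m : Nat) : Int) := by
  simp [swapIdx, PySem.Int.mod, Int.fmod_eq_emod]
  split_ifs <;> omega

theorem swapIdx_even (m : Nat) (ll : Int) (hm : m % 2 = 0) (h : (m : Int) + 2 ≤ ll) :
    swapIdx ll (m : Int) = ((m + 1 : Nat) : Int) := by
  simp [swapIdx, PySem.Int.mod, Int.fmod_eq_emod]
  split_ifs <;> omega

theorem swapIdx_odd (m : Nat) (ll : Int) (hm : m % 2 = 0) (h : (m : Int) + 1 ≤ ll) :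
    swapIdx ll ((m : Int) + 1) = ((m : Nat) : Int) := by
  simp [swapIdx, PySem.Int.mod, Int.fmod_eq_emod]
  split_ifs <;> omega

theorem set_append_head {α : Type} (l₁ : List α) (x : α) (t : List α) (v : α) :
    (l₁ ++ x :: t).set l₁.length v = l₁ ++ v :: t := by
  induction l₁ with
  | nil => simp
  | cons y ys ih => simp [ih]

theorem set_append_second {α : Type} (l₁ : List α) (x y : α) (t : List α) (v : α) :
    (l₁ ++ x :: y :: t).set (l₁.length + 1) v = l₁ ++ x :: v :: t := by
  induction l₁ with
  | nil => simp only [List.nil_append, List.length_nil, Nat.zero_add, List.set_cons_succ,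
      List.set_cons_zero]
  | cons z zs ih => simp only [List.cons_append, List.length_cons, List.set_cons_succ, ih]

theorem concatSwaps_loop_eq (s : String)
    (sizes : List Int) (done : List String) (start : Int) (hpar : done.length % 2 = 0) :
    ((PySem.List.enumerate sizes (done.length : Int)).foldl
        (concatSwapsStep s ((done.length + sizes.length : Nat) : Int))
        (done ++ List.replicate sizes.length "", start)).1
      = done ++ concatSwapsGo s start sizes := by
  match sizes with
  | [] => simp [concatSwapsGo]
  | [a] =>
      simp only [PySem.List.enumerate_cons, PySem.List.enumerate_nil, List.foldl_cons,
        List.foldl_nil, concatSwapsStep, List.length_cons, List.length_nil,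
        List.replicate_succ, List.replicate_zero, concatSwapsGo]
      rw [swapIdx_last done.length hpar, PySem.List.pySetD_natCast, set_append_head]
  | a :: b :: rest =>
      have hll : ((done.length + (a :: b :: rest).length : Nat) : Int)
          = ((done.length + 2 + rest.length : Nat) : Int) := by
        simp only [List.length_cons]; push_cast; ring
      simp only [PySem.List.enumerate_cons, List.foldl_cons, concatSwapsStep]
      rw [swapIdx_even done.length _ hpar (by rw [hll]; push_cast; omega),
        PySem.List.pySetD_natCast]
      rw [show List.replicate (a :: b :: rest).length ""
            = ("" :: "" :: List.replicate rest.length "" : List String) by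
          simp [List.replicate_succ]]
      rw [set_append_second]
      rw [swapIdx_odd done.length _ hpar (by rw [hll]; push_cast; omega),
        PySem.List.pySetD_natCast, set_append_head]
      have hrec := concatSwaps_loop_eq s rest
        (done ++ [PySem.Str.slice s (some (start + a)) (some (start + a + b)),
                  PySem.Str.slice s (some start) (some (start + a))])
        (start + a + b) (by simp; omega)
      simp only [List.length_append, List.length_cons, List.length_nil, List.append_assoc,
        List.cons_append, List.nil_append] at hrec
      rw [show ((done.length : Int) + 1 + 1) = ((done.length + (0 + 1 + 1) : Nat) : Int) by
          push_cast; ring]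
      rw [hll, show done.length + 2 + rest.length = done.length + (0 + 1 + 1) + rest.length by omega]
      rw [hrec]
      simp [concatSwapsGo]
termination_by sizes.length

-- ===== VERDICT (by name: the statement is the Claim_ definition above) =====
theorem concatSwaps_spec : Claim_equal_concatSwaps := by
  intro s sizes _
  unfold Spec_concatSwaps concatSwaps concatSwaps_alt
  have h := concatSwaps_loop_eq s sizes [] 0 (by simp)
  simpa using congrArg (PySem.Str.join "") h
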